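-- pv_equiv track=rewrite | github.com/saksham-shr/Event-Report-Generator-Christ-Deemed-to-be-University- | app.py | parse_attendance_text
-- ===== SOURCE A (Python) =====
-- def parse_attendance_text(text):
--     if not text:
--         return []
--     # split by newlines or commas
--     parts = []
--     for line in text.splitlines():
--         line = line.strip()
--         if not line:
--             continue
--         # if multiple names in line separated by commas
--         if ',' in line:
--             for p in line.split(','):
--                 p = p.strip()
--                 if p:
--                     parts.append(p)
--         else:
--             parts.append(line)
--     return parts
-- ===== SOURCE B (Python) =====
-- def parse_attendance_text(text):
--     # single-pass character scanner: flush the current (already-trimmed) name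
--     # at every delimiter; whitespace is buffered and only committed when a
--     # further non-whitespace character arrives, so names come out stripped.
--     names = []
--     buf = ''    # current name so far, no leading/trailing whitespace
--     pend = ''   # whitespace seen after buf, not yet known to be interior
--     for ch in text:
--         if ch in ',\n\r':
--             if buf:
--                 names.append(buf)
--             buf = ''
--             pend = ''
--         elif ch in ' \t':
--             if buf:
--                 pend += ch
--         else:
--             buf += pend + ch
--             pend = ''
--     if buf:
--         names.append(buf)
--     return names
-- ===== Notes on version B (the rewrite author's own statement) =====
-- stated objective: alternative
-- what changed: A's staged splitlines/comma-split/strip pipeline with a nested per-line loop is replaced by a single character-level scan with an accumulator state (current name buffer plus pending-whitespace buffer) that flushes on every delimiter, so no intermediate line or piece lists are ever built.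
import Mathlib
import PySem

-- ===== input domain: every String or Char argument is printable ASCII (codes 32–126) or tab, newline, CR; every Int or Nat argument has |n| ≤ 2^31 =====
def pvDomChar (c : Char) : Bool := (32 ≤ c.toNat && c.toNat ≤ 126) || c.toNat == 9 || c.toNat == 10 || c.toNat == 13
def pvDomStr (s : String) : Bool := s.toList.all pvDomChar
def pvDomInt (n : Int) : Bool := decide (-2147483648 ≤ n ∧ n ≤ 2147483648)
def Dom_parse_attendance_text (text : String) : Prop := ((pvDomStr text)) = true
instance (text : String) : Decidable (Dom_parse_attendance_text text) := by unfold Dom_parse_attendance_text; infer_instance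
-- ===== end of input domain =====

-- B replaces A's staged splitlines/comma-split/strip pipeline (with its nested
-- per-line loop) by a single character-level scan with an accumulator state
-- (current name buffer + pending-whitespace buffer) that flushes on each
-- delimiter; objective: alternative (same cost, no intermediate lists).

-- ===== PORT A =====
def parse_attendance_text (text : String) : List String :=
  if text == "" then []
  else
    (PySem.Str.splitlines text).foldl
      (fun parts line0 =>
        let line := PySem.Str.strip line0
        if line == "" then parts
        else if PySem.Str.isIn "," line then
          ((PySem.Str.split? line ",").getD []).foldl
            (fun parts p =>
              let q := PySem.Str.strip p
              if q == "" then parts else parts ++ [q])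
            parts
        else parts ++ [line])
      []

-- ===== PORT B =====
-- the for-loop of Source B over the characters, followed by the final flush;
-- buf/pend are the two string accumulators (kept as List Char)
def pvScanGo (names : List String) (buf pend : List Char) : List Char → List String
  | [] => if buf.isEmpty then names else names ++ [String.ofList buf]
  | c :: t =>
    if c == ',' || c == '\n' || c == '\r' then
      pvScanGo (if buf.isEmpty then names else names ++ [String.ofList buf]) [] [] t
    else if c == ' ' || c == '\t' then
      pvScanGo names buf (if buf.isEmpty then pend else pend ++ [c]) t
    else
      pvScanGo names (buf ++ pend ++ [c]) [] t

def parse_attendance_text_alt (text : String) : List String :=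
  pvScanGo [] [] [] text.toList

-- ===== PRECONDITION & SPEC =====
def Spec_parse_attendance_text (text : String) (out : List String) : Prop := out = parse_attendance_text_alt text
instance (text : String) (out : List String) : Decidable (Spec_parse_attendance_text text out) := by unfold Spec_parse_attendance_text; infer_instance

-- ===== CLAIM (what is proved, stated in full; the proofs are below) =====
def Claim_equal_parse_attendance_text : Prop := ∀ (text : String), Dom_parse_attendance_text text → Spec_parse_attendance_text text (parse_attendance_text text)

-- ===== LEMMAS AND PROOFS =====

-- delimiter predicates: newline-ish, comma, both
def pvNLR (c : Char) : Bool := c.toNat == 10 || c.toNat == 13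
def pvC (c : Char) : Bool := c == ','
def pvD (c : Char) : Bool := pvNLR c || c == ','

-- split a char list at every delimiter: (first piece, remaining pieces)
def pvSplit (P : Char → Bool) : List Char → List Char × List (List Char)
  | [] => ([], [])
  | c :: t =>
    let r := pvSplit P t
    if P c then ([], r.1 :: r.2) else (c :: r.1, r.2)

def pvPieces (P : Char → Bool) (l : List Char) : List (List Char) :=
  (pvSplit P l).1 :: (pvSplit P l).2

-- strip every piece, drop the empty results
def pvFs (l : List (List Char)) : List (List Char) :=
  (l.map PySem.Chars.strip).filter (fun x => !(x == []))

-- tokenisation of one splitlines-line: split at commas, strip, drop empties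
def pvG (r : List Char) : List (List Char) := pvFs (pvPieces pvC r)

-- modify the last element of a list of pieces
def pvModLast (f : List Char → List Char) : List (List Char) → List (List Char)
  | [] => []
  | [a] => [f a]
  | a :: b :: t => a :: pvModLast f (b :: t)

theorem pvFs_append (a b : List (List Char)) : pvFs (a ++ b) = pvFs a ++ pvFs b := by
  simp [pvFs]

theorem pvSplit_noDelim (P : Char → Bool) (l : List Char)
    (h : ∀ c ∈ l, P c = false) : pvSplit P l = (l, []) := by
  induction l with
  | nil => rfl
  | cons c t ih =>
    simp only [pvSplit]
    rw [ih (fun c hc => h c (List.mem_cons_of_mem _ hc))]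
    simp [h c (List.mem_cons_self)]

theorem pvSplit_congr (P Q : Char → Bool) (l : List Char)
    (h : ∀ c ∈ l, P c = Q c) : pvSplit P l = pvSplit Q l := by
  induction l with
  | nil => rfl
  | cons c t ih =>
    simp only [pvSplit]
    rw [ih (fun c hc => h c (List.mem_cons_of_mem _ hc)), h c List.mem_cons_self]

theorem pvSplit_prefix (P : Char → Bool) (w l : List Char)
    (h : ∀ c ∈ w, P c = false) :
    pvSplit P (w ++ l) = (w ++ (pvSplit P l).1, (pvSplit P l).2) := by
  induction w with
  | nil => simp
  | cons c t ih =>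
    simp only [List.cons_append, pvSplit]
    rw [ih (fun c hc => h c (List.mem_cons_of_mem _ hc))]
    simp [h c List.mem_cons_self]

theorem pvSplit_delim_append (P : Char → Bool) (a b : List Char) (c : Char)
    (h : P c = true) :
    pvSplit P (a ++ c :: b) = ((pvSplit P a).1, (pvSplit P a).2 ++ pvPieces P b) := by
  induction a with
  | nil => simp [pvSplit, h, pvPieces]
  | cons d t ih =>
    simp only [List.cons_append, pvSplit, ih]
    by_cases hd : P d = true <;> simp [hd]

theorem pvPieces_ws_append (P : Char → Bool) (l w : List Char)
    (h : ∀ c ∈ w, P c = false) :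
    pvPieces P (l ++ w) = pvModLast (· ++ w) (pvPieces P l) := by
  induction l with
  | nil =>
    simp only [List.nil_append, pvPieces, pvSplit, pvSplit_noDelim P w h, pvModLast]
  | cons c t ih =>
    simp only [pvPieces] at ih
    rcases ht : pvSplit P (t ++ w) with ⟨h1, h2⟩
    rcases ht' : pvSplit P t with ⟨g1, g2⟩
    rw [ht, ht'] at ih
    simp only [pvPieces, List.cons_append, pvSplit, ht, ht']
    by_cases hc : P c = true
    · simp only [hc, if_pos]
      simp only [pvModLast]
      cases g2 with
      | nil => simp [pvModLast] at ih ⊢; exact ih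
      | cons x xs => simp [pvModLast] at ih ⊢; exact ih
    · simp only [if_neg hc]
      cases g2 with
      | nil =>
        simp [pvModLast] at ih ⊢
        obtain ⟨e1, e2⟩ := ih
        subst e1; cases e2; simp [pvModLast]
      | cons x xs =>
        simp [pvModLast] at ih ⊢
        obtain ⟨e1, e2⟩ := ih
        subst e1; rw [e2]; simp [pvModLast]

theorem strip_cons_space (c : Char) (x : List Char) (h : PySem.Chars.isspace c = true) :
    PySem.Chars.strip (c :: x) = PySem.Chars.strip x := by
  simp [PySem.Chars.strip, PySem.Chars.lstrip, List.dropWhile_cons, h]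

theorem strip_ws_prefix (w x : List Char) (h : ∀ c ∈ w, PySem.Chars.isspace c = true) :
    PySem.Chars.strip (w ++ x) = PySem.Chars.strip x := by
  induction w with
  | nil => simp
  | cons c t ih =>
    rw [List.cons_append, strip_cons_space c _ (h c List.mem_cons_self),
      ih (fun c hc => h c (List.mem_cons_of_mem _ hc))]

theorem rstrip_ws_suffix (y w : List Char) (h : ∀ c ∈ w, PySem.Chars.isspace c = true) :
    PySem.Chars.rstrip (y ++ w) = PySem.Chars.rstrip y := by
  have hw : w.reverse.dropWhile PySem.Chars.isspace = [] := by
    rw [List.dropWhile_eq_nil_iff]; intro c hc; exact h c (List.mem_reverse.mp hc)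
  simp [PySem.Chars.rstrip, List.reverse_append, List.dropWhile_append, hw]

theorem strip_ws_suffix (x w : List Char) (h : ∀ c ∈ w, PySem.Chars.isspace c = true) :
    PySem.Chars.strip (x ++ w) = PySem.Chars.strip x := by
  have hw : w.dropWhile PySem.Chars.isspace = [] := by
    rw [List.dropWhile_eq_nil_iff]; intro c hc; exact h c hc
  simp only [PySem.Chars.strip, PySem.Chars.lstrip, List.dropWhile_append]
  by_cases he : (x.dropWhile PySem.Chars.isspace).isEmpty = true
  · simp [he, hw, List.isEmpty_iff.mp he]
  · simp only [he, if_neg, Bool.false_eq_true, not_false_iff, if_false]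
    exact rstrip_ws_suffix _ w h

theorem strip_decomp (l : List Char) :
    ∃ w1 w2, (∀ c ∈ w1, PySem.Chars.isspace c = true) ∧
      (∀ c ∈ w2, PySem.Chars.isspace c = true) ∧
      l = w1 ++ PySem.Chars.strip l ++ w2 := by
  refine ⟨l.takeWhile PySem.Chars.isspace,
    (((l.dropWhile PySem.Chars.isspace).reverse.takeWhile PySem.Chars.isspace)).reverse,
    fun c hc => List.mem_takeWhile_imp hc,
    fun c hc => List.mem_takeWhile_imp (List.mem_reverse.mp hc), ?_⟩
  conv_lhs => rw [← List.takeWhile_append_dropWhile (p := PySem.Chars.isspace) (l := l)]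
  rw [List.append_assoc]
  congr 1
  simp only [PySem.Chars.strip, PySem.Chars.lstrip, PySem.Chars.rstrip]
  conv_lhs => rw [← List.reverse_reverse (l.dropWhile PySem.Chars.isspace)]
  rw [← List.reverse_append, ← List.reverse_reverse ((l.dropWhile PySem.Chars.isspace).reverse)]
  congr 2
  rw [List.reverse_reverse, List.takeWhile_append_dropWhile]

theorem strip_nil_all_space (r : List Char) (h : PySem.Chars.strip r = []) :
    ∀ c ∈ r, PySem.Chars.isspace c = true := by
  obtain ⟨w1, w2, h1, h2, hd⟩ := strip_decomp r
  rw [h, List.append_nil] at hd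
  intro c hc
  rw [hd] at hc
  rcases List.mem_append.mp hc with hc | hc
  · exact h1 c hc
  · exact h2 c hc

theorem mem_comma_strip (r : List Char) :
    ',' ∈ PySem.Chars.strip r ↔ ',' ∈ r := by
  obtain ⟨w1, w2, h1, h2, hd⟩ := strip_decomp r
  constructor
  · intro hc; rw [hd]; simp [hc]
  · intro hc
    rw [hd] at hc
    rcases List.mem_append.mp hc with hc | hc
    · rcases List.mem_append.mp hc with hc | hc
      · have := h1 _ hc; simp [PySem.Chars.isspace] at this
      · exact hc
    · have := h2 _ hc; simp [PySem.Chars.isspace] at this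

theorem space_not_pvC (c : Char) (h : PySem.Chars.isspace c = true) : pvC c = false := by
  by_cases hc : c = ','
  · subst hc; simp [PySem.Chars.isspace] at h
  · simp [pvC, hc]

theorem mapStrip_modLast (w : List Char) (xs : List (List Char))
    (h : ∀ c ∈ w, PySem.Chars.isspace c = true) :
    (pvModLast (· ++ w) xs).map PySem.Chars.strip = xs.map PySem.Chars.strip := by
  induction xs with
  | nil => rfl
  | cons a t ih =>
    cases t with
    | nil => simp [pvModLast, strip_ws_suffix a w h]
    | cons b tt => simpa [pvModLast] using ih

theorem stripInv (r : List Char) :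
    (pvPieces pvC (PySem.Chars.strip r)).map PySem.Chars.strip
      = (pvPieces pvC r).map PySem.Chars.strip := by
  obtain ⟨w1, w2, h1, h2, hd⟩ := strip_decomp r
  conv_rhs => rw [hd]
  rw [List.append_assoc]
  have hp1 : ∀ c ∈ w1, pvC c = false := fun c hc => space_not_pvC c (h1 c hc)
  have hp2 : ∀ c ∈ w2, pvC c = false := fun c hc => space_not_pvC c (h2 c hc)
  have e1 : pvPieces pvC (w1 ++ (PySem.Chars.strip r ++ w2))
      = (w1 ++ (pvSplit pvC (PySem.Chars.strip r ++ w2)).1)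
        :: (pvSplit pvC (PySem.Chars.strip r ++ w2)).2 := by
    simp [pvPieces, pvSplit_prefix pvC w1 _ hp1]
  rw [e1]
  have e2 : pvPieces pvC (PySem.Chars.strip r ++ w2)
      = pvModLast (· ++ w2) (pvPieces pvC (PySem.Chars.strip r)) :=
    pvPieces_ws_append pvC _ w2 hp2
  have e3 : (pvPieces pvC (PySem.Chars.strip r ++ w2)).map PySem.Chars.strip
      = (pvPieces pvC (PySem.Chars.strip r)).map PySem.Chars.strip := by
    rw [e2, mapStrip_modLast w2 _ h2]
  simp only [pvPieces] at e3 ⊢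
  simp only [List.map_cons, List.cons.injEq] at e3 ⊢
  exact ⟨by rw [strip_ws_prefix w1 _ h1]; exact e3.1.symm, e3.2.symm⟩

theorem pvG_of_strip_nil (r : List Char) (h : PySem.Chars.strip r = []) : pvG r = [] := by
  have hs := strip_nil_all_space r h
  have : pvSplit pvC r = (r, []) :=
    pvSplit_noDelim pvC r (fun c hc => space_not_pvC c (hs c hc))
  simp [pvG, pvPieces, this, pvFs, h]

theorem pvG_of_no_comma (r : List Char) (h0 : PySem.Chars.strip r ≠ [])
    (h : ',' ∉ PySem.Chars.strip r) : pvG r = [PySem.Chars.strip r] := by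
  have hr : ',' ∉ r := fun hc => h ((mem_comma_strip r).mpr hc)
  have : pvSplit pvC r = (r, []) := by
    refine pvSplit_noDelim pvC r (fun c hc => ?_)
    by_cases hcc : c = ','
    · exact absurd (hcc ▸ hc) hr
    · simp [pvC, hcc]
  simp [pvG, pvPieces, this, pvFs, h0]

theorem pvG_strip (r : List Char) : pvFs (pvPieces pvC (PySem.Chars.strip r)) = pvG r := by
  simp only [pvG, pvFs]
  rw [stripInv r]

theorem foldl_if_skip {α β : Type} (q : α → Bool) (f : α → β) (l : List α) (acc : List β) :
    l.foldl (fun a x => if q x = true then a else a ++ [f x]) acc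
      = acc ++ (l.filter (fun x => !q x)).map f := by
  induction l generalizing acc with
  | nil => simp
  | cons a t ih =>
    by_cases hq : q a = true
    · simp [List.foldl_cons, hq, ih]
    · simp only [List.foldl_cons, if_neg hq, ih, List.filter_cons]
      simp [Bool.not_eq_true] at hq
      simp [hq]

theorem singleton_infix_iff (a : Char) (l : List Char) : [a] <:+: l ↔ a ∈ l := by
  constructor
  · rintro ⟨s, t, rfl⟩; simp
  · intro h
    obtain ⟨s, t, rfl⟩ := List.append_of_mem h
    exact ⟨s, t, by simp⟩

theorem splitOn_go_comma (fuel : Nat) (l cur : List Char) (accs : List (List Char))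
    (h : l.length < fuel) :
    PySem.Chars.splitOn.go [','] fuel l cur accs
      = accs.reverse ++ (cur.reverse ++ (pvSplit pvC l).1) :: (pvSplit pvC l).2 := by
  induction fuel generalizing l cur accs with
  | zero => omega
  | succ n ih =>
    cases l with
    | nil => simp [PySem.Chars.splitOn.go, pvSplit]
    | cons c t =>
      rw [PySem.Chars.splitOn.go.eq_def]
      simp only []
      by_cases hc : c = ','
      · subst hc
        have hp : [','].isPrefixOf (',' :: t) = true := by simp [List.isPrefixOf]
        simp only [hp, if_pos, List.length_cons, List.length_nil, List.drop_succ_cons,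
          List.drop_zero]
        rw [ih t [] (cur.reverse :: accs) (by simp at h; omega)]
        simp [pvSplit, pvC]
      · have hp : [','].isPrefixOf (c :: t) = false := by
          simp only [List.isPrefixOf, Bool.and_eq_false_iff, beq_eq_false_iff_ne, ne_eq]
          exact Or.inl fun h => hc h.symm
        simp only [hp, Bool.false_eq_true, if_false]
        rw [ih t (c :: cur) accs (by simp at h; omega)]
        have : pvC c = false := by simp [pvC, hc]
        simp [pvSplit, this]

theorem splitOn_comma (l : List Char) :
    PySem.Chars.splitOn l [','] = pvPieces pvC l := by
  rw [PySem.Chars.splitOn, splitOn_go_comma _ _ _ _ (by omega)]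
  simp [pvPieces]

theorem splitlines_go_spec (F : List Char → List (List Char)) (isB : Char → Bool)
    (s cur : List Char) (accs : List (List Char))
    (hF : F [] = [])
    (hB : ∀ c, pvDomChar c = true → isB c = pvNLR c)
    (hD : ∀ c ∈ s, pvDomChar c = true) :
    (PySem.Chars.splitlines.go isB s cur accs).flatMap F
      = accs.reverse.flatMap F ++ F (cur.reverse ++ (pvSplit pvNLR s).1)
          ++ (pvSplit pvNLR s).2.flatMap F := by
  rw [PySem.Chars.splitlines.go.eq_def]
  split
  · by_cases hc : cur.isEmpty = true
    · have hc' : cur = [] := List.isEmpty_iff.mp hc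
      subst hc'
      simp [hc, pvSplit, hF]
    · simp [hc, pvSplit]
  · rename_i rest
    rw [splitlines_go_spec F isB rest [] (cur.reverse :: accs) hF hB
      (fun c hc => hD c (by simp [hc]))]
    have h1 : pvNLR '\r' = true := by decide
    have h2 : pvNLR '\n' = true := by decide
    simp [pvSplit, h1, h2, hF]
  · rename_i cur2 acc2 c rest hx
    by_cases hc : isB c = true
    · have hn : pvNLR c = true := by
        rw [← hB c (hD c (by simp))]; exact hc
      simp only [hc, if_pos]
      rw [splitlines_go_spec F isB rest [] (cur.reverse :: accs) hF hB
        (fun x hx => hD x (by simp [hx]))]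
      simp [pvSplit, hn, hF]
    · have hn : pvNLR c = false := by
        rw [← hB c (hD c (by simp))]; simpa using hc
      simp only [hc, Bool.false_eq_true, if_false]
      rw [splitlines_go_spec F isB rest (c :: cur) accs hF hB
        (fun x hx => hD x (by simp [hx]))]
      simp [pvSplit, hn, hF]
termination_by s.length
decreasing_by all_goals (subst_vars; simp only [List.length_cons]; omega)

theorem isB_dom (c : Char) (h : pvDomChar c = true) :
    ((decide (c.toNat = 10) || decide (c.toNat = 13) || decide (c.toNat = 11)
      || decide (c.toNat = 12) || decide (c.toNat = 28) || decide (c.toNat = 29)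
      || decide (c.toNat = 30) || decide (c.toNat = 133) || decide (c.toNat = 8232)
      || decide (c.toNat = 8233)) : Bool) = pvNLR c := by
  simp only [pvDomChar, Bool.or_eq_true, Bool.and_eq_true, decide_eq_true_eq, beq_iff_eq] at h
  rw [Bool.eq_iff_iff]
  simp only [pvNLR, Bool.or_eq_true, decide_eq_true_eq, beq_iff_eq]
  omega

theorem ofList_beq_empty (l : List Char) : (String.ofList l == "") = (l == []) := by
  cases h : l == [] <;> simp_all

theorem split_twice (s pre : List Char) (h : ∀ c ∈ pre, pvNLR c = false) :
    pvG (pre ++ (pvSplit pvNLR s).1) ++ (pvSplit pvNLR s).2.flatMap pvG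
      = pvFs (pvPieces pvD (pre ++ s)) := by
  induction s generalizing pre with
  | nil =>
    have hcd : pvSplit pvC pre = pvSplit pvD pre :=
      pvSplit_congr pvC pvD pre (fun c hc => by simp [pvC, pvD, h c hc])
    simp [pvSplit, pvG, pvPieces, hcd]
  | cons c t ih =>
    by_cases hc : pvNLR c = true
    · have hd : pvD c = true := by simp [pvD, hc]
      have hcd : pvSplit pvC pre = pvSplit pvD pre :=
        pvSplit_congr pvC pvD pre (fun c hc => by simp [pvC, pvD, h c hc])
      have ih0 := ih [] (by simp)
      simp only [List.nil_append] at ih0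
      have hrw : pvPieces pvD (pre ++ c :: t) = pvPieces pvD pre ++ pvPieces pvD t := by
        simp [pvPieces, pvSplit_delim_append pvD pre t c hd]
      rw [hrw, pvFs_append]
      simp only [pvSplit, hc, if_pos, List.append_nil, List.flatMap_cons]
      rw [← List.append_assoc, ← ih0]
      simp [pvG, pvPieces, hcd]
    · have hc' : pvNLR c = false := by simpa using hc
      have ih1 := ih (pre ++ [c]) (by
        intro x hx
        rcases List.mem_append.mp hx with hx | hx
        · exact h x hx
        · simp at hx; subst hx; exact hc')
      simp only [pvSplit, hc', Bool.false_eq_true, if_false]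
      rw [List.append_cons pre c ((pvSplit pvNLR t).1 : List Char)]
      rw [ih1, List.append_cons pre c t]

theorem foldl_congr' {A B : Type} (f g : List B -> A -> List B) :
    ∀ (l : List A) (init : List B),
      (∀ acc x, x ∈ l -> f acc x = g acc x) → l.foldl f init = l.foldl g init
  | [], _, _ => rfl
  | a :: t, init, h => by
    simp only [List.foldl_cons]
    rw [h init a List.mem_cons_self]
    exact foldl_congr' f g t _ (fun acc x hx => h acc x (List.mem_cons_of_mem _ hx))

set_option maxHeartbeats 1000000 in
theorem inner_loop (parts : List String) (line0 : String) :
    ((PySem.Str.split? (PySem.Str.strip line0) ",").getD []).foldl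
      (fun parts p =>
        let q := PySem.Str.strip p
        if q == "" then parts else parts ++ [q]) parts
    = parts ++ (pvG line0.toList).map String.ofList := by
  have h1 : (",":String).toList = [','] := rfl
  have hsplit : (PySem.Str.split? (PySem.Str.strip line0) ",").getD []
      = (pvPieces pvC (PySem.Chars.strip line0.toList)).map String.ofList := by
    rw [PySem.Str.split?, h1, PySem.Str.toList_strip, PySem.Chars.split?]
    simp only [List.isEmpty_cons, Bool.false_eq_true, if_false, Option.map_some, Option.getD_some]
    rw [splitOn_comma]
  rw [hsplit, List.foldl_map]
  have hcongr : ∀ (a : List String) (p : List Char),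
      p ∈ pvPieces pvC (PySem.Chars.strip line0.toList) →
      (let q := PySem.Str.strip (String.ofList p)
       if q == "" then a else a ++ [q])
      = (if (PySem.Chars.strip p == []) = true then a
         else a ++ [String.ofList (PySem.Chars.strip p)]) := by
    intro a p _
    have hsp : PySem.Str.strip (String.ofList p) = String.ofList (PySem.Chars.strip p) := by
      rw [PySem.Str.strip, String.toList_ofList]
    simp only [hsp, ofList_beq_empty]
  refine (foldl_congr' _ (fun (a : List String) (p : List Char) =>
    if (PySem.Chars.strip p == []) = true then a
    else a ++ [String.ofList (PySem.Chars.strip p)]) _ _ hcongr).trans ?_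
  rw [foldl_if_skip]
  congr 1
  rw [← pvG_strip line0.toList, pvFs, List.filter_map]
  simp [Function.comp_def]

theorem A_char (text : String) (h : ¬ text = "") :
    parse_attendance_text text
      = ((PySem.Chars.splitlines text.toList).flatMap pvG).map String.ofList := by
  unfold parse_attendance_text
  rw [if_neg (by simpa using h)]
  have hstep : ∀ (parts : List String) (line0 : String),
      line0 ∈ PySem.Str.splitlines text →
      (fun (parts : List String) (line0 : String) =>
        let line := PySem.Str.strip line0
        if line == "" then parts
        else if PySem.Str.isIn "," line then
          ((PySem.Str.split? line ",").getD []).foldl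
            (fun parts p =>
              let q := PySem.Str.strip p
              if q == "" then parts else parts ++ [q])
            parts
        else parts ++ [line]) parts line0
      = parts ++ (pvG line0.toList).map String.ofList := by
    intro parts line0 _
    simp only []
    have hstrip : PySem.Str.strip line0 = String.ofList (PySem.Chars.strip line0.toList) := rfl
    by_cases hmt : PySem.Chars.strip line0.toList = []
    · rw [if_pos (by rw [hstrip, ofList_beq_empty]; simpa using hmt)]
      rw [pvG_of_strip_nil _ hmt]
      simp
    · rw [if_neg (by rw [hstrip, ofList_beq_empty]; simpa using hmt)]
      have hiff : PySem.Str.isIn "," (PySem.Str.strip line0) = true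
          ↔ ',' ∈ PySem.Chars.strip line0.toList := by
        rw [PySem.Str.isIn]
        have h1 : (",":String).toList = [','] := rfl
        rw [h1, PySem.Str.toList_strip]
        rw [PySem.Chars.isIn_iff_infix, singleton_infix_iff]
      by_cases hcm : ',' ∈ PySem.Chars.strip line0.toList
      · rw [if_pos (hiff.mpr hcm)]
        exact inner_loop parts line0
      · rw [if_neg (fun hx => hcm (hiff.mp hx))]
        rw [pvG_of_no_comma _ hmt hcm, hstrip]
        simp
  refine (foldl_congr' _ (fun (parts : List String) (line0 : String) =>
    parts ++ (pvG line0.toList).map String.ofList) _ _ hstep).trans ?_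
  rw [PySem.List.foldl_append_eq_flatMap, List.nil_append]
  have hs : PySem.Str.splitlines text
      = (PySem.Chars.splitlines text.toList).map String.ofList := rfl
  rw [hs, List.flatMap_map, List.map_flatMap]
  congr 1
  funext r
  simp [String.toList_ofList]

-- A reduced to the combined-delimiter pieces form
theorem A_pvD (text : String) (h : ¬ text = "")
    (hD : ∀ c ∈ text.toList, pvDomChar c = true) :
    parse_attendance_text text = (pvFs (pvPieces pvD text.toList)).map String.ofList := by
  rw [A_char text h]
  congr 1
  simp only [PySem.Chars.splitlines]
  rw [splitlines_go_spec pvG _ _ [] [] rfl (fun c hc => isB_dom c hc) hD]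
  have hA := split_twice text.toList [] (by simp)
  simp only [List.nil_append] at hA
  simp only [List.reverse_nil, List.flatMap_nil, List.nil_append]
  rw [hA]

-- ===== lemmas for B's scanner =====

theorem char_eq_iff_toNat (c d : Char) : c = d ↔ c.toNat = d.toNat :=
  ⟨fun h => by rw [h], fun h => by rw [← Char.ofNat_toNat c, h, Char.ofNat_toNat]⟩

theorem pvD_guard (c : Char) : (c == ',' || c == '\n' || c == '\r') = pvD c := by
  rw [Bool.eq_iff_iff]
  simp only [pvD, pvNLR, Bool.or_eq_true, beq_iff_eq]
  constructor
  · rintro ((h | h) | h)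
    · exact Or.inr h
    · exact Or.inl (Or.inl (by rw [h]; decide))
    · exact Or.inl (Or.inr (by rw [h]; decide))
  · rintro ((h | h) | h)
    · exact Or.inl (Or.inr ((char_eq_iff_toNat c '\n').mpr (by rw [h]; rfl)))
    · exact Or.inr ((char_eq_iff_toNat c '\r').mpr (by rw [h]; rfl))
    · exact Or.inl (Or.inl h)

theorem ws_guard_space (c : Char) (h : (c == ' ' || c == '\t') = true) :
    PySem.Chars.isspace c = true := by
  rcases Bool.or_eq_true_iff.mp h with h | h
  · rw [beq_iff_eq] at h; subst h; decide
  · rw [beq_iff_eq] at h; subst h; decide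

theorem dom_nonspace (c : Char) (hD : pvDomChar c = true)
    (h1 : (c == ',' || c == '\n' || c == '\r') = false)
    (h2 : (c == ' ' || c == '\t') = false) : PySem.Chars.isspace c = false := by
  have hn : c.toNat ≠ 10 ∧ c.toNat ≠ 13 ∧ c.toNat ≠ 32 ∧ c.toNat ≠ 9 := by
    refine ⟨fun h => ?_, fun h => ?_, fun h => ?_, fun h => ?_⟩
    · have : c = '\n' := (char_eq_iff_toNat c '\n').mpr (by rw [h]; rfl)
      simp [this] at h1
    · have : c = '\r' := (char_eq_iff_toNat c '\r').mpr (by rw [h]; rfl)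
      simp [this] at h1
    · have : c = ' ' := (char_eq_iff_toNat c ' ').mpr (by rw [h]; rfl)
      simp [this] at h2
    · have : c = '\t' := (char_eq_iff_toNat c '\t').mpr (by rw [h]; rfl)
      simp [this] at h2
  simp only [pvDomChar, Bool.or_eq_true, Bool.and_eq_true, decide_eq_true_eq,
    beq_iff_eq] at hD
  simp only [PySem.Chars.isspace, Bool.or_eq_false_iff, Bool.and_eq_false_iff,
    decide_eq_false_iff_not]
  omega

theorem lstrip_of_head (l : List Char)
    (hh : ∀ h, l.head? = some h → PySem.Chars.isspace h = false) :
    PySem.Chars.lstrip l = l := by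
  cases l with
  | nil => rfl
  | cons a t =>
    simp [PySem.Chars.lstrip, List.dropWhile_cons, hh a rfl]

theorem rstrip_of_last (l : List Char)
    (hl : ∀ h, l.getLast? = some h → PySem.Chars.isspace h = false) :
    PySem.Chars.rstrip l = l := by
  unfold PySem.Chars.rstrip
  cases hr : l.reverse with
  | nil =>
    have : l = [] := by simpa using congrArg List.reverse hr
    simp [this]
  | cons b rs =>
    have hb : l.getLast? = some b := by
      rw [← List.head?_reverse, hr]; rfl
    rw [List.dropWhile_cons, hl b hb]
    simp only [Bool.false_eq_true, if_false]
    rw [← hr, List.reverse_reverse]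

theorem strip_of_ends (l : List Char)
    (hh : ∀ h, l.head? = some h → PySem.Chars.isspace h = false)
    (hl : ∀ h, l.getLast? = some h → PySem.Chars.isspace h = false) :
    PySem.Chars.strip l = l := by
  unfold PySem.Chars.strip
  rw [lstrip_of_head l hh, rstrip_of_last l hl]

theorem pvFs_cons_of_strip_eq (x y : List Char) (r : List (List Char))
    (h : PySem.Chars.strip x = PySem.Chars.strip y) :
    pvFs (x :: r) = pvFs (y :: r) := by
  simp [pvFs, List.filter_cons, h]

theorem pvFs_cons (x : List Char) (r : List (List Char)) :
    pvFs (x :: r)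
      = (if PySem.Chars.strip x = [] then [] else [PySem.Chars.strip x]) ++ pvFs r := by
  simp only [pvFs, List.map_cons, List.filter_cons]
  by_cases h : PySem.Chars.strip x = [] <;> simp [h]

-- the scanner invariant: buf is a stripped word, pend trailing whitespace
theorem scan_spec (l : List Char) (names : List String) (buf pend : List Char)
    (hD : ∀ c ∈ l, pvDomChar c = true)
    (hbh : ∀ h, buf.head? = some h → PySem.Chars.isspace h = false)
    (hbl : ∀ h, buf.getLast? = some h → PySem.Chars.isspace h = false)
    (hp : ∀ c ∈ pend, PySem.Chars.isspace c = true)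
    (he : buf = [] → pend = []) :
    pvScanGo names buf pend l
      = names ++ (pvFs ((buf ++ pend ++ (pvSplit pvD l).1) :: (pvSplit pvD l).2)).map
          String.ofList := by
  induction l generalizing names buf pend with
  | nil =>
    have hsb : PySem.Chars.strip (buf ++ pend) = buf := by
      rw [strip_ws_suffix _ _ hp, strip_of_ends buf hbh hbl]
    simp only [pvScanGo, pvSplit, List.append_nil]
    rw [pvFs_cons, hsb]
    by_cases hb : buf = []
    · simp [hb, pvFs]
    · rw [if_neg hb]
      simp [List.isEmpty_iff, hb, pvFs]
  | cons c t ih =>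
    cases hg1 : (c == ',' || c == '\n' || c == '\r') with
    | true =>
      have hd : pvD c = true := by rw [← pvD_guard]; exact hg1
      have hsb : PySem.Chars.strip (buf ++ pend) = buf := by
        rw [strip_ws_suffix _ _ hp, strip_of_ends buf hbh hbl]
      simp only [pvScanGo, hg1, if_pos]
      rw [ih _ [] [] (fun x hx => hD x (by simp [hx])) (by intro h hc; simp at hc)
        (by intro h hc; simp at hc) (by intro x hx; simp at hx) (fun _ => rfl)]
      simp only [pvSplit, hd, if_pos, List.append_nil, List.nil_append]
      rw [pvFs_cons (buf ++ pend), hsb]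
      by_cases hb : buf = []
      · simp [hb, List.isEmpty_iff]
      · rw [if_neg hb]
        simp [List.isEmpty_iff, hb]
    | false =>
      have hdf : pvD c = false := by rw [← pvD_guard]; exact hg1
      simp only [pvScanGo, hg1, Bool.false_eq_true, if_false]
      cases hg2 : (c == ' ' || c == '\t') with
      | true =>
        have hsc : PySem.Chars.isspace c = true := ws_guard_space c hg2
        simp only [hg2, if_pos]
        by_cases hb : buf = []
        · have hpe : pend = [] := he hb
          subst hb; subst hpe
          simp only [List.isEmpty_nil, if_pos]
          rw [ih names [] [] (fun x hx => hD x (by simp [hx])) hbh hbl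
            (by intro x hx; simp at hx) (fun _ => rfl)]
          simp only [pvSplit, hdf, Bool.false_eq_true, if_false, List.nil_append]
          congr 2
          exact (pvFs_cons_of_strip_eq _ _ _ (strip_cons_space c _ hsc)).symm
        · have hbe : buf.isEmpty = false := by simp [List.isEmpty_iff, hb]
          simp only [hbe, Bool.false_eq_true, if_false]
          rw [ih names buf (pend ++ [c]) (fun x hx => hD x (by simp [hx])) hbh hbl
            (by
              intro x hx
              rcases List.mem_append.mp hx with hx | hx
              · exact hp x hx
              · simp at hx; subst hx; exact hsc)
            (fun hbb => absurd hbb hb)]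
          simp only [pvSplit, hdf, Bool.false_eq_true, if_false]
          congr 3
          simp
      | false =>
        have hsc : PySem.Chars.isspace c = false :=
          dom_nonspace c (hD c (by simp)) hg1 hg2
        simp only [hg2, Bool.false_eq_true, if_false]
        rw [ih names (buf ++ pend ++ [c]) [] (fun x hx => hD x (by simp [hx]))
          (by
            intro h hc
            by_cases hb : buf = []
            · have hpe : pend = [] := he hb
              subst hb; subst hpe
              simp at hc; subst hc; exact hsc
            · rw [List.append_assoc, List.head?_append_of_ne_nil _ hb] at hc
              exact hbh h hc)
          (by
            intro h hc
            rw [List.getLast?_concat] at hc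
            cases hc; exact hsc)
          (by intro x hx; simp at hx) (by intro h; simp at h)]
        simp only [pvSplit, hdf, Bool.false_eq_true, if_false]
        congr 3
        simp

-- ===== VERDICT (by name: the statement is the Claim_ definition above) =====
theorem parse_attendance_text_spec : Claim_equal_parse_attendance_text := by
  intro text hdom
  unfold Spec_parse_attendance_text
  by_cases h : text = ""
  · subst h; rfl
  · have hD : ∀ c ∈ text.toList, pvDomChar c = true := by
      unfold Dom_parse_attendance_text pvDomStr at hdom
      simpa [List.all_eq_true] using hdom
    rw [A_pvD text h hD]
    unfold parse_attendance_text_alt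
    rw [scan_spec text.toList [] [] [] hD (by intro x hx; simp at hx)
      (by intro x hx; simp at hx) (by intro x hx; simp at hx) (fun _ => rfl)]
    simp [pvPieces]
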